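-- pv_equiv track=rewrite | github.com/benquick123/code-profiling | code/batch-1/vse-naloge-brez-testov/DN7-M-17.py | najvec_sosedov
-- ===== SOURCE A (Python) =====
-- def sosedov(x, y, mine):
--     counter = 0
--     uzyn = range(x-1, x+2)
--     gapdal = range(y-1, y+2)
--     for j in uzyn:
--         for k in gapdal:
--             if (j,k) in mine:
--                 if (j,k) != (x,y):
--                     counter += 1
--     return counter
--
-- def najvec_sosedov(mine, s, v):
--
--     max = 0
--     kx = 0
--     ky = 0
--     uzyn = range(s)
--     gapdal = range(v)
--
--     for j in uzyn:
--         for k in gapdal: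
--             counter = sosedov(j,k, mine)
--             while counter > max:
--                 max = counter
--                 kx = j
--                 ky = k
--     return (kx, ky)
-- ===== SOURCE B (Python) =====
-- def najvec_sosedov(mine, s, v):
--     mset = set(mine)
--     deltas = [(-1, -1), (-1, 0), (-1, 1), (0, -1), (0, 1), (1, -1), (1, 0), (1, 1)]
--     cand = set()
--     for (x, y) in mset:
--         for (dx, dy) in deltas:
--             j, k = x + dx, y + dy
--             if 0 <= j < s and 0 <= k < v:
--                 cand.add((j, k))
--     best = 0
--     cell = (0, 0)
--     for c in sorted(cand):
--         n = sum(1 for (dx, dy) in deltas if (c[0] + dx, c[1] + dy) in mset)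
--         if n > best:
--             best = n
--             cell = c
--     return cell
-- ===== Notes on version B (the rewrite author's own statement) =====
-- stated objective: faster
-- what changed: Instead of scanning every grid cell and re-scanning the mine list for each of its 9 neighbours, B collects the in-bounds neighbour cells of the (deduplicated) mines as the only candidates, scores each candidate by set lookups, and takes the first strict maximum over the candidates sorted in row-major order.
import Mathlib
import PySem

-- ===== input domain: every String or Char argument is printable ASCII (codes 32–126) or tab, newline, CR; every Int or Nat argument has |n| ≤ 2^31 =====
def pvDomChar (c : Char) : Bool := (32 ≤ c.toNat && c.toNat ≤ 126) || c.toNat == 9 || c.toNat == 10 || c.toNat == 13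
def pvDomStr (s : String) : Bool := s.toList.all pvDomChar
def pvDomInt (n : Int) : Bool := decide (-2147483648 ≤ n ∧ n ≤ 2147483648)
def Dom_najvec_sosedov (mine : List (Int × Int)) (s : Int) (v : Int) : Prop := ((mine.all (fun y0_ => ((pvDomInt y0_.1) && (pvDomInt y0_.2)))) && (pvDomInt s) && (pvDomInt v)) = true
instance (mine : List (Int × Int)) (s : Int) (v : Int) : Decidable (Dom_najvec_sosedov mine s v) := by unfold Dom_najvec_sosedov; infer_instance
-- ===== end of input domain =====

-- B replaces A's full-grid scan (which re-scans the mine list for each of the 9 neighbours of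
-- every grid cell) by scoring only the in-bounds neighbour cells of the deduplicated mines,
-- visited in sorted row-major order, with set lookups: an asymptotically faster exact
-- re-implementation.

-- ===== PORT A =====
def sosedov (x : Int) (y : Int) (mine : List (Int × Int)) : Int :=
  (PySem.List.pyRange (x - 1) (x + 2) 1).foldl (fun counter j =>
    (PySem.List.pyRange (y - 1) (y + 2) 1).foldl (fun counter k =>
      if (j, k) ∈ mine then
        if (j, k) ≠ (x, y) then counter + 1 else counter
      else counter) counter) 0

-- the Python 'while counter > max: …' executes its body at most once (the body sets max = counter),
-- so it is ported as the equivalent if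
def najvec_sosedov (mine : List (Int × Int)) (s : Int) (v : Int) : Int × Int :=
  let st := (PySem.List.pyRange 0 s 1).foldl (fun st j =>
    (PySem.List.pyRange 0 v 1).foldl (fun st k =>
      let counter := sosedov j k mine
      if counter > st.1 then (counter, j, k) else st) st) (0, 0, 0)
  (st.2.1, st.2.2)

-- ===== PORT B =====
def pvDeltas : List (Int × Int) :=
  [(-1, -1), (-1, 0), (-1, 1), (0, -1), (0, 1), (1, -1), (1, 0), (1, 1)]

def najvec_sosedov_alt (mine : List (Int × Int)) (s : Int) (v : Int) : Int × Int :=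
  let mset : PySem.Set (Int × Int) := PySem.Set.ofList mine
  let cand : PySem.Set (Int × Int) :=
    mset.foldl (fun cand m =>
      pvDeltas.foldl (fun cand d =>
        if 0 ≤ m.1 + d.1 ∧ m.1 + d.1 < s ∧ 0 ≤ m.2 + d.2 ∧ m.2 + d.2 < v then
          PySem.Set.add cand (m.1 + d.1, m.2 + d.2)
        else cand) cand) PySem.Set.empty
  let st := (PySem.List.sorted2 cand (fun c => c.1) (fun c => c.2)).foldl (fun st c =>
      -- n = sum(1 for (dx, dy) in deltas if (c[0] + dx, c[1] + dy) in mset)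
      let n : Int := pvDeltas.foldl (fun n d => if (c.1 + d.1, c.2 + d.2) ∈ mset then n + 1 else n) 0
      if n > st.1 then (n, c) else st) (0, (0, 0))
  st.2

-- ===== PRECONDITION & SPEC =====
def Spec_najvec_sosedov (mine : List (Int × Int)) (s : Int) (v : Int) (out : Int × Int) : Prop := out = najvec_sosedov_alt mine s v
instance (mine : List (Int × Int)) (s : Int) (v : Int) (out : Int × Int) : Decidable (Spec_najvec_sosedov mine s v out) := by unfold Spec_najvec_sosedov; infer_instance

-- ===== CLAIM (what is proved, stated in full; the proofs are below) =====
def Claim_equal_najvec_sosedov : Prop := ∀ (mine : List (Int × Int)) (s : Int) (v : Int), Dom_najvec_sosedov mine s v → Spec_najvec_sosedov mine s v (najvec_sosedov mine s v)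

-- ===== LEMMAS AND PROOFS =====

-- the common score of a cell: how many of its 8 neighbours are in the mine list
def pvScore (mine : List (Int × Int)) (c : Int × Int) : Int :=
  pvDeltas.foldl (fun n d => if (c.1 + d.1, c.2 + d.2) ∈ mine then n + 1 else n) 0

-- the common loop step: first strict maximum, state (max, kx, ky)
def pvStep (mine : List (Int × Int)) (st : Int × Int × Int) (c : Int × Int) : Int × Int × Int :=
  if pvScore mine c > st.1 then (pvScore mine c, c.1, c.2) else st

-- the row-major list of grid cells A scans
def pvGrid (s v : Int) : List (Int × Int) :=
  (PySem.List.pyRange 0 s 1).flatMap (fun j => (PySem.List.pyRange 0 v 1).map (fun k => (j, k)))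

-- strict row-major (lexicographic) order on cells, and its negated converse
def pvLex (a b : Int × Int) : Prop := a.1 < b.1 ∨ (a.1 = b.1 ∧ a.2 < b.2)
def pvLe (a b : Int × Int) : Prop := ¬ pvLex b a

-- B's candidate set, named for the proofs
def pvCand (mine : List (Int × Int)) (s : Int) (v : Int) : PySem.Set (Int × Int) :=
  (PySem.Set.ofList mine).foldl (fun cand m =>
    pvDeltas.foldl (fun cand d =>
      if 0 ≤ m.1 + d.1 ∧ m.1 + d.1 < s ∧ 0 ≤ m.2 + d.2 ∧ m.2 + d.2 < v then
        PySem.Set.add cand (m.1 + d.1, m.2 + d.2)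
      else cand) cand) PySem.Set.empty

lemma pyRange_triple (a : Int) : PySem.List.pyRange (a - 1) (a + 2) 1 = [a - 1, a, a + 1] := by
  rw [PySem.List.pyRange_one_cons (by omega), PySem.List.pyRange_one_cons (by omega),
      PySem.List.pyRange_one_cons (by omega), PySem.List.pyRange_one_eq_nil (by omega)]
  norm_num

lemma sosedov_eq (x y : Int) (mine : List (Int × Int)) :
    sosedov x y mine = pvScore mine (x, y) := by
  have h0 : ∀ u w : Int, (((u, w) : Int × Int) = (x, y)) ↔ (u = x ∧ w = y) := by
    simp [Prod.ext_iff]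
  unfold sosedov pvScore pvDeltas
  rw [pyRange_triple, pyRange_triple]
  simp only [List.foldl, ne_eq, h0, sub_eq_self, add_eq_left, one_ne_zero, and_false,
    and_true, not_false_iff, if_true, and_self, not_true, if_false, ite_self,
    ← sub_eq_add_neg, add_zero]

lemma score_eq_countP (mine : List (Int × Int)) (c : Int × Int) :
    pvScore mine c = ((List.countP (fun d => decide ((c.1 + d.1, c.2 + d.2) ∈ mine)) pvDeltas : Nat) : Int) := by
  unfold pvScore
  exact (PySem.List.foldl_ite_add_one (fun d => (c.1 + d.1, c.2 + d.2) ∈ mine) pvDeltas 0).trans (by ring)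

lemma score_nonneg (mine : List (Int × Int)) (c : Int × Int) : 0 ≤ pvScore mine c := by
  rw [score_eq_countP]; positivity

lemma score_pos_iff (mine : List (Int × Int)) (c : Int × Int) :
    0 < pvScore mine c ↔ ∃ d ∈ pvDeltas, (c.1 + d.1, c.2 + d.2) ∈ mine := by
  rw [score_eq_countP]
  simp [List.countP_pos_iff]

lemma foldl_foldl_flatMap {β : Type} (la lb : List Int) (g : β → Int × Int → β) (init : β) :
    la.foldl (fun st j => lb.foldl (fun st k => g st (j, k)) st) init
      = (la.flatMap (fun j => lb.map (fun k => (j, k)))).foldl g init := by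
  induction la generalizing init with
  | nil => rfl
  | cons j la ih => simp [List.foldl_append, List.foldl_map, ih]

lemma najvec_sosedov_eq_fold (mine : List (Int × Int)) (s v : Int) :
    najvec_sosedov mine s v = ((pvGrid s v).foldl (pvStep mine) (0, 0, 0)).2 := by
  unfold najvec_sosedov pvGrid
  rw [← foldl_foldl_flatMap]
  have h : (PySem.List.pyRange 0 s 1).foldl (fun st j =>
      (PySem.List.pyRange 0 v 1).foldl (fun st k =>
        let counter := sosedov j k mine
        if counter > st.1 then (counter, j, k) else st) st) ((0 : Int), (0 : Int), (0 : Int))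
      = (PySem.List.pyRange 0 s 1).foldl (fun st j =>
      (PySem.List.pyRange 0 v 1).foldl (fun st k => pvStep mine st (j, k)) st) (0, 0, 0) := by
    apply PySem.List.foldl_congr_mem
    intro acc j _
    apply PySem.List.foldl_congr_mem
    intro acc' k _
    simp [pvStep, sosedov_eq]
  simp only [h]

lemma mem_grid (s v : Int) (c : Int × Int) :
    c ∈ pvGrid s v ↔ 0 ≤ c.1 ∧ c.1 < s ∧ 0 ≤ c.2 ∧ c.2 < v := by
  obtain ⟨c1, c2⟩ := c
  simp [pvGrid, PySem.List.mem_pyRange_one, and_assoc]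

lemma flatMap_pairwise (la lb : List Int) (ha : la.Pairwise (· < ·)) (hb : lb.Pairwise (· < ·)) :
    (la.flatMap (fun j => lb.map (fun k => (j, k)))).Pairwise pvLex := by
  induction la with
  | nil => simp
  | cons j la ih =>
    rw [List.pairwise_cons] at ha
    simp only [List.flatMap_cons]
    rw [List.pairwise_append]
    refine ⟨?_, ih ha.2, ?_⟩
    · exact List.Pairwise.map _ (fun a b h => Or.inr ⟨rfl, h⟩) hb
    · intro a hamem b hbmem
      obtain ⟨k, _, rfl⟩ := List.mem_map.mp hamem
      obtain ⟨j', hj', k', _, rfl⟩ := by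
        simpa [List.mem_flatMap, List.mem_map] using hbmem
      exact Or.inl (ha.1 j' hj')

lemma grid_pairwise (s v : Int) : (pvGrid s v).Pairwise pvLex :=
  flatMap_pairwise _ _ (PySem.List.pairwise_lt_pyRange_one 0 s) (PySem.List.pairwise_lt_pyRange_one 0 v)

lemma lex_ne (a b : Int × Int) (h : pvLex a b) : a ≠ b := by
  obtain ⟨a1, a2⟩ := a; obtain ⟨b1, b2⟩ := b
  simp only [pvLex] at h
  simp only [ne_eq, Prod.mk.injEq, not_and]
  omega

lemma grid_nodup (s v : Int) : (pvGrid s v).Nodup :=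
  (grid_pairwise s v).imp (fun h => lex_ne _ _ h)

-- folding the first-strict-max step skips cells of score ≤ 0
lemma fold_filter_pos (mine : List (Int × Int)) (l : List (Int × Int))
    (st : Int × Int × Int) (h : 0 ≤ st.1) :
    l.foldl (pvStep mine) st
      = (l.filter (fun c => decide (0 < pvScore mine c))).foldl (pvStep mine) st := by
  induction l generalizing st with
  | nil => rfl
  | cons c l ih =>
    by_cases hp : 0 < pvScore mine c
    · have hst : 0 ≤ (pvStep mine st c).1 := by
        unfold pvStep; split
        · exact score_nonneg mine c
        · exact h
      simp only [List.foldl_cons, List.filter_cons, hp, decide_true, if_true]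
      exact ih _ hst
    · have hstep : pvStep mine st c = st := by
        unfold pvStep
        rw [if_neg (by omega)]
      simp only [List.foldl_cons, List.filter_cons, hp, decide_false, hstep]
      exact ih _ h

-- membership and nodup of a fold of conditional Set.add's
lemma mem_foldl_addIf (l : List (Int × Int)) (f : Int × Int → Int × Int)
    (p : Int × Int → Prop) [DecidablePred p] (s : PySem.Set (Int × Int)) (c : Int × Int) :
    c ∈ l.foldl (fun s b => if p (f b) then PySem.Set.add s (f b) else s) s
      ↔ c ∈ s ∨ ∃ b ∈ l, c = f b ∧ p c := by
  induction l generalizing s with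
  | nil => simp
  | cons b l ih =>
    simp only [List.foldl_cons, ih]
    by_cases hb : p (f b)
    · simp only [hb, if_true, PySem.Set.mem_add]
      constructor
      · rintro (⟨h | rfl⟩ | h)
        · exact Or.inl h
        · exact Or.inr ⟨b, List.mem_cons_self .., rfl, hb⟩
        · obtain ⟨b', hb', rfl, hp⟩ := h
          exact Or.inr ⟨b', List.mem_cons_of_mem _ hb', rfl, hp⟩
      · rintro (h | ⟨b', hb', rfl, hp⟩)
        · exact Or.inl (Or.inl h)
        · rcases List.mem_cons.mp hb' with rfl | hb'
          · exact Or.inl (Or.inr rfl)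
          · exact Or.inr ⟨b', hb', rfl, hp⟩
    · simp only [hb, if_false]
      constructor
      · rintro (h | ⟨b', hb', rfl, hp⟩)
        · exact Or.inl h
        · exact Or.inr ⟨b', List.mem_cons_of_mem _ hb', rfl, hp⟩
      · rintro (h | ⟨b', hb', rfl, hp⟩)
        · exact Or.inl h
        · rcases List.mem_cons.mp hb' with rfl | hb'
          · exact absurd hp hb
          · exact Or.inr ⟨b', hb', rfl, hp⟩

lemma nodup_foldl_addIf (l : List (Int × Int)) (f : Int × Int → Int × Int)
    (p : Int × Int → Prop) [DecidablePred p] (s : PySem.Set (Int × Int)) (hs : List.Nodup s) :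
    List.Nodup (l.foldl (fun s b => if p (f b) then PySem.Set.add s (f b) else s) s) := by
  induction l generalizing s with
  | nil => exact hs
  | cons b l ih =>
    simp only [List.foldl_cons]
    apply ih
    split
    · exact PySem.Set.nodup_add _ _ hs
    · exact hs

lemma mem_inner (m : Int × Int) (s v : Int) (acc : PySem.Set (Int × Int)) (c : Int × Int) :
    c ∈ pvDeltas.foldl (fun cand d =>
        if 0 ≤ m.1 + d.1 ∧ m.1 + d.1 < s ∧ 0 ≤ m.2 + d.2 ∧ m.2 + d.2 < v then
          PySem.Set.add cand (m.1 + d.1, m.2 + d.2)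
        else cand) acc
      ↔ c ∈ acc ∨ ∃ d ∈ pvDeltas, c = (m.1 + d.1, m.2 + d.2)
          ∧ (0 ≤ c.1 ∧ c.1 < s ∧ 0 ≤ c.2 ∧ c.2 < v) := by
  exact mem_foldl_addIf pvDeltas (fun d => (m.1 + d.1, m.2 + d.2))
    (fun c => 0 ≤ c.1 ∧ c.1 < s ∧ 0 ≤ c.2 ∧ c.2 < v) acc c

lemma mem_outer (l : List (Int × Int)) (s v : Int) (acc : PySem.Set (Int × Int)) (c : Int × Int) :
    c ∈ l.foldl (fun cand m =>
        pvDeltas.foldl (fun cand d =>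
          if 0 ≤ m.1 + d.1 ∧ m.1 + d.1 < s ∧ 0 ≤ m.2 + d.2 ∧ m.2 + d.2 < v then
            PySem.Set.add cand (m.1 + d.1, m.2 + d.2)
          else cand) cand) acc
      ↔ c ∈ acc ∨ ∃ m ∈ l, ∃ d ∈ pvDeltas, c = (m.1 + d.1, m.2 + d.2)
          ∧ (0 ≤ c.1 ∧ c.1 < s ∧ 0 ≤ c.2 ∧ c.2 < v) := by
  induction l generalizing acc with
  | nil => simp
  | cons m l ih =>
    simp only [List.foldl_cons, ih, mem_inner, List.mem_cons]
    constructor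
    · rintro ((h | ⟨d, hd, rfl, hin⟩) | ⟨m', hm', rest⟩)
      · exact Or.inl h
      · exact Or.inr ⟨m, Or.inl rfl, d, hd, rfl, hin⟩
      · exact Or.inr ⟨m', Or.inr hm', rest⟩
    · rintro (h | ⟨m', hm' | hm', rest⟩)
      · exact Or.inl (Or.inl h)
      · subst hm'; exact Or.inl (Or.inr rest)
      · exact Or.inr ⟨m', hm', rest⟩

lemma mem_cand (mine : List (Int × Int)) (s v : Int) (c : Int × Int) :
    c ∈ pvCand mine s v
      ↔ (0 ≤ c.1 ∧ c.1 < s ∧ 0 ≤ c.2 ∧ c.2 < v)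
          ∧ ∃ m ∈ mine, ∃ d ∈ pvDeltas, c = (m.1 + d.1, m.2 + d.2) := by
  unfold pvCand
  rw [mem_outer]
  simp only [PySem.Set.mem_ofList]
  constructor
  · rintro (h | ⟨m, hm, d, hd, rfl, hin⟩)
    · simp [PySem.Set.empty] at h
    · exact ⟨hin, m, hm, d, hd, rfl⟩
  · rintro ⟨hin, m, hm, d, hd, rfl⟩
    exact Or.inr ⟨m, hm, d, hd, rfl, hin⟩


lemma nodup_inner (m : Int × Int) (s v : Int) (acc : PySem.Set (Int × Int)) (hs : List.Nodup acc) :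
    List.Nodup (pvDeltas.foldl (fun cand d =>
        if 0 ≤ m.1 + d.1 ∧ m.1 + d.1 < s ∧ 0 ≤ m.2 + d.2 ∧ m.2 + d.2 < v then
          PySem.Set.add cand (m.1 + d.1, m.2 + d.2)
        else cand) acc) :=
  nodup_foldl_addIf pvDeltas (fun d => (m.1 + d.1, m.2 + d.2))
    (fun c => 0 ≤ c.1 ∧ c.1 < s ∧ 0 ≤ c.2 ∧ c.2 < v) acc hs

lemma cand_nodup (mine : List (Int × Int)) (s v : Int) : List.Nodup (pvCand mine s v) := by
  unfold pvCand
  generalize PySem.Set.ofList mine = l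
  have h : ∀ (l : List (Int × Int)) (acc : PySem.Set (Int × Int)), List.Nodup acc →
      List.Nodup (l.foldl (fun cand m =>
        pvDeltas.foldl (fun cand d =>
          if 0 ≤ m.1 + d.1 ∧ m.1 + d.1 < s ∧ 0 ≤ m.2 + d.2 ∧ m.2 + d.2 < v then
            PySem.Set.add cand (m.1 + d.1, m.2 + d.2)
          else cand) cand) acc) := by
    intro l
    induction l with
    | nil => intro acc h; exact h
    | cons m l ih => intro acc h; exact ih _ (nodup_inner m s v acc h)
  exact h l PySem.Set.empty (by simp [PySem.Set.empty])

lemma neg_mem_deltas (d : Int × Int) (hd : d ∈ pvDeltas) : (-d.1, -d.2) ∈ pvDeltas := by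
  fin_cases hd <;> simp [pvDeltas]

lemma adj_symm (mine : List (Int × Int)) (c : Int × Int) :
    (∃ m ∈ mine, ∃ d ∈ pvDeltas, c = (m.1 + d.1, m.2 + d.2))
      ↔ ∃ d ∈ pvDeltas, (c.1 + d.1, c.2 + d.2) ∈ mine := by
  constructor
  · rintro ⟨m, hm, d, hd, rfl⟩
    refine ⟨(-d.1, -d.2), neg_mem_deltas d hd, ?_⟩
    simpa using hm
  · rintro ⟨d, hd, hm⟩
    refine ⟨(c.1 + d.1, c.2 + d.2), hm, (-d.1, -d.2), neg_mem_deltas d hd, ?_⟩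
    simp

-- the insertion sort of B's candidate set
lemma blex_iff (a b : Int × Int) :
    (decide (a.1 < b.1) || (!decide (b.1 < a.1) && decide (a.2 < b.2))) = true ↔ pvLex a b := by
  simp [pvLex]
  omega

lemma insertBy_sorted (x : Int × Int) (ys : List (Int × Int)) (h : ys.Pairwise pvLe) :
    (PySem.List.insertBy (fun a b => decide (a.1 < b.1) || (!decide (b.1 < a.1) && decide (a.2 < b.2))) x ys).Pairwise pvLe := by
  induction ys with
  | nil => simp [PySem.List.insertBy]
  | cons y ys ih =>
    rw [List.pairwise_cons] at h
    obtain ⟨hy, hys⟩ := h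
    by_cases hb : (decide (x.1 < y.1) || (!decide (y.1 < x.1) && decide (x.2 < y.2))) = true
    · have hlex : pvLex x y := (blex_iff x y).mp hb
      simp only [PySem.List.insertBy]
      rw [if_pos hb]
      rw [List.pairwise_cons]
      refine ⟨?_, List.pairwise_cons.mpr ⟨hy, hys⟩⟩
      intro z hz
      rcases List.mem_cons.mp hz with rfl | hz
      · unfold pvLe pvLex at *; omega
      · have := hy z hz
        unfold pvLe pvLex at *; omega
    · simp only [PySem.List.insertBy]
      rw [if_neg hb]
      rw [List.pairwise_cons]
      refine ⟨?_, ih hys⟩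
      intro z hz
      rcases (PySem.List.mem_insertBy _ _ _ _).mp hz with rfl | hz
      · have := (blex_iff z y).not.mp (by simpa using hb)
        unfold pvLe pvLex at *; omega
      · exact hy z hz

lemma sorted2_eq_of (xs ys : List (Int × Int)) (hperm : ys.Perm xs) (hsorted : ys.Pairwise pvLex) :
    PySem.List.sorted2 xs (fun c => c.1) (fun c => c.2) = ys := by
  have hs2 : PySem.List.sorted2 xs (fun c => c.1) (fun c => c.2)
      = xs.foldl (fun acc x => PySem.List.insertBy
          (fun a b => decide (a.1 < b.1) || (!decide (b.1 < a.1) && decide (a.2 < b.2))) x acc) [] := rfl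
  have hsort : ∀ (l : List (Int × Int)) (acc : List (Int × Int)), acc.Pairwise pvLe →
      (l.foldl (fun acc x => PySem.List.insertBy
          (fun a b => decide (a.1 < b.1) || (!decide (b.1 < a.1) && decide (a.2 < b.2))) x acc) acc).Pairwise pvLe := by
    intro l
    induction l with
    | nil => intro acc h; exact h
    | cons x l ih => intro acc h; exact ih _ (insertBy_sorted x acc h)
  have hp0 : (xs.foldl (fun acc x => PySem.List.insertBy
      (fun a b => decide (a.1 < b.1) || (!decide (b.1 < a.1) && decide (a.2 < b.2))) x acc) []).Perm xs := by
    simpa using PySem.List.foldl_insertBy_perm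
      (fun a b : Int × Int => decide (a.1 < b.1) || (!decide (b.1 < a.1) && decide (a.2 < b.2))) xs []
  have hperm2 : (PySem.List.sorted2 xs (fun c => c.1) (fun c => c.2)).Perm ys := by
    rw [hs2]
    exact hp0.trans hperm.symm
  apply List.Perm.eq_of_pairwise (le := pvLe)
  · intro a b _ _ h1 h2
    obtain ⟨a1, a2⟩ := a; obtain ⟨b1, b2⟩ := b
    unfold pvLe pvLex at h1 h2
    simp only [Prod.mk.injEq]
    constructor <;> omega
  · rw [hs2]; exact hsort xs [] (by simp)
  · exact hsorted.imp (fun {a b} h => by unfold pvLe pvLex at *; omega)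
  · exact hperm2

lemma alt_eq (mine : List (Int × Int)) (s v : Int) :
    najvec_sosedov_alt mine s v
      = ((PySem.List.sorted2 (pvCand mine s v) (fun c => c.1) (fun c => c.2)).foldl
          (pvStep mine) (0, 0, 0)).2 := by
  unfold najvec_sosedov_alt pvCand pvStep pvScore
  simp only [PySem.Set.mem_ofList]

-- ===== VERDICT (by name: the statement is the Claim_ definition above) =====
theorem najvec_sosedov_spec : Claim_equal_najvec_sosedov := by
  intro mine s v _
  unfold Spec_najvec_sosedov
  rw [najvec_sosedov_eq_fold, alt_eq]
  have hL : PySem.List.sorted2 (pvCand mine s v) (fun c => c.1) (fun c => c.2)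
      = (pvGrid s v).filter (fun c => decide (0 < pvScore mine c)) := by
    apply sorted2_eq_of
    · rw [List.perm_ext_iff_of_nodup (List.Nodup.filter _ (grid_nodup s v)) (cand_nodup mine s v)]
      intro c
      rw [List.mem_filter, mem_grid, mem_cand, decide_eq_true_eq, score_pos_iff, adj_symm]
    · exact List.Pairwise.filter _ (grid_pairwise s v)
  rw [hL, ← fold_filter_pos mine _ _ (by norm_num)]
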